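-- pv_equiv track=rewrite | github.com/Hponky/Diseno-de-algoritmos-con-grafos | backend/generators/graph_probability.py | getIndicesToMargenalice
-- ===== SOURCE A (Python) =====
-- def getIndicesToMargenalice(states, state):
--     availableIndices = []
--     indices = {}
--     csValue = ""
--     for i in range(len(state)):
--         if state[i] != None:
--             availableIndices.append(i)
--             csValue = str(state[i]) + csValue
--
--     for i in range(len(states)):
--         key = ""
--         for j in range(len(availableIndices)):
--             key += str(states[i][availableIndices[j]])
--
--         indices[key] = indices.get(key) + [i] if indices.get(key) else [i]
--     if not csValue:
--         return indices, 0
--     return indices, int(csValue, 2)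
-- ===== SOURCE B (Python) =====
-- def getIndicesToMargenalice(states, state):
--     sel = [i for i, v in enumerate(state) if v is not None]
--     keys = ["".join(str(row[j]) for j in sel) for row in states]
--     indices = {}
--     for k in keys:
--         if k not in indices:
--             indices[k] = [i for i, kk in enumerate(keys) if kk == k]
--     value = 0
--     for j in reversed(sel):
--         value = 2 * value + state[j]
--     return indices, value
-- ===== Notes on version B (the rewrite author's own statement) =====
-- stated objective: alternative
-- what changed: Replaces the incremental dict-append grouping and the build-a-binary-string-then-int(s,2) parse by a two-phase decomposition: compute all row keys first, build each group once per distinct key with a full index scan, and compute the integer directly by Horner arithmetic over the selected bits (no string parsing).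
-- outside the precondition, e.g. on getIndicesToMargenalice([[9]], [10]): A returns ({'9': [0]}, 2), B returns ({'9': [0]}, 10); on getIndicesToMargenalice([[3]], [2]): A raises ValueError, B returns ({'3': [0]}, 2); on getIndicesToMargenalice([], [-1]): A returns ({}, -1), B returns ({}, -1)
import Mathlib
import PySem

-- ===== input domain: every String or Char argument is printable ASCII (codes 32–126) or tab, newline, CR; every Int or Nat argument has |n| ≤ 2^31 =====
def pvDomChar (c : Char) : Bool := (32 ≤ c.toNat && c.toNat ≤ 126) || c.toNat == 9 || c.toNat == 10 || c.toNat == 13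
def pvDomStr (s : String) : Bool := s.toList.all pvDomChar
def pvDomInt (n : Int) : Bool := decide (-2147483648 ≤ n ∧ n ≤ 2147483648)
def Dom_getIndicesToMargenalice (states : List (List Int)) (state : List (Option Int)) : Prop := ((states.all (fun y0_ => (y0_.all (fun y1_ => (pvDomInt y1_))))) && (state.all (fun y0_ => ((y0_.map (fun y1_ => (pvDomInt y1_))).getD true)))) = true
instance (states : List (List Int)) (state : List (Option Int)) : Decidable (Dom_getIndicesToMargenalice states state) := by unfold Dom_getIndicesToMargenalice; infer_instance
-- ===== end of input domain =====

-- B replaces A's incremental dict-append grouping and binary-string parse by a two-phase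
-- grouping (all row keys first, one full index scan per distinct key) and direct Horner
-- arithmetic over the selected bits; same return value on Pre_ (no argument is mutated).

-- ===== PORT A =====
-- int(csValue, 2): ported by hand as the plain base-2 digit fold (the prelude's exact parser
-- PySem.Int.ofCharsBase? keeps its digit loop private, so it cannot be reasoned about here);
-- this fold is exact exactly where csValue is a nonempty run of '0'/'1' characters — which
-- Pre_ guarantees (all selected state values are 0 or 1); on any other csValue Python raises
-- ValueError and the input is outside Pre_.
def pvBin2 (cs : List Char) : Int := cs.foldl (fun a c => 2 * a + (if c = '1' then 1 else 0)) 0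

def getIndicesToMargenalice (states : List (List Int)) (state : List (Option Int)) : (List (String × List Int)) × Int :=
  let acs := (PySem.List.pyRange 0 (PySem.List.len state) 1).foldl
      (fun (p : List Int × List Char) i =>
        match PySem.List.pyGetD state i none with
        | some v => (p.1 ++ [i], PySem.Int.toChars v ++ p.2)
        | none => p) ([], [])
  let availableIndices := acs.1
  let csValue := acs.2
  let indices := (PySem.List.pyRange 0 (PySem.List.len states) 1).foldl
      (fun (d : PySem.Dict (List Char) (List Int)) i =>
        let key := (PySem.List.pyRange 0 (PySem.List.len availableIndices) 1).foldl
            (fun k j => k ++ PySem.Int.toChars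
              (PySem.List.pyGetD (PySem.List.pyGetD states i []) (PySem.List.pyGetD availableIndices j 0) 0)) []
        match d.get? key with
        | some (x :: xs) => d.insert key ((x :: xs) ++ [i])
        | _ => d.insert key [i]) PySem.Dict.empty
  let out := indices.items.map (fun p => (String.ofList p.1, p.2))
  if csValue = [] then (out, 0) else (out, pvBin2 csValue)

-- ===== PORT B =====
-- [i for i, kk in enumerate(keys) if kk == k]
def pvFullIdx (keys : List (List Char)) (k : List Char) : List Int :=
  ((PySem.List.enumerate keys 0).filter (fun p => p.2 == k)).map (·.1)

def getIndicesToMargenalice_alt (states : List (List Int)) (state : List (Option Int)) : (List (String × List Int)) × Int :=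
  let sel : List Int := ((PySem.List.enumerate state 0).filter (fun p => p.2.isSome)).map (·.1)
  let keys : List (List Char) := states.map (fun row =>
      PySem.Chars.join [] (sel.map (fun j => PySem.Int.toChars (PySem.List.pyGetD row j 0))))
  let indices := keys.foldl
      (fun (d : PySem.Dict (List Char) (List Int)) k =>
        if d.contains k then d else d.insert k (pvFullIdx keys k))
      PySem.Dict.empty
  -- state[j] is an int (never None) for every j in sel, hence the .getD 0 is never taken
  let value := sel.reverse.foldl (fun a j => 2 * a + (PySem.List.pyGetD state j none).getD 0) 0
  (indices.items.map (fun p => (String.ofList p.1, p.2)), value)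

-- ===== PRECONDITION & SPEC =====
-- Pre_ excludes state values other than the bits 0/1 and rows of states shorter than a
-- selected index: there A usually raises (ValueError from int(csValue, 2), IndexError from
-- states[i][j]); on the remaining corner — non-bit values whose decimal digits are all 0/1,
-- e.g. 10 — A's reading of the concatenated decimal string as base 2 and B's Horner value of
-- the raw entries are both accidental choices for a state that holds no bit vector.
def Pre_getIndicesToMargenalice (states : List (List Int)) (state : List (Option Int)) : Prop :=
  (∀ v ∈ state, v = none ∨ v = some 0 ∨ v = some 1) ∧
  (∀ row ∈ states, ∀ i : Nat, i < state.length → state.getD i none ≠ none → i < row.length)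
instance (states : List (List Int)) (state : List (Option Int)) : Decidable (Pre_getIndicesToMargenalice states state) := by unfold Pre_getIndicesToMargenalice; infer_instance

def pvWitness_getIndicesToMargenalice : List (List Int) × List (Option Int) :=
  ([[0, 1], [1, 1], [0, 1]], [some 1, none])

def Spec_getIndicesToMargenalice (states : List (List Int)) (state : List (Option Int)) (out : (List (String × List Int)) × Int) : Prop := out = getIndicesToMargenalice_alt states state
instance (states : List (List Int)) (state : List (Option Int)) (out : (List (String × List Int)) × Int) : Decidable (Spec_getIndicesToMargenalice states state out) := by unfold Spec_getIndicesToMargenalice; infer_instance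

-- ===== CLAIM (what is proved, stated in full; the proofs are below) =====
def Claim_equal_getIndicesToMargenalice : Prop := ∀ (states : List (List Int)) (state : List (Option Int)), Dom_getIndicesToMargenalice states state → Pre_getIndicesToMargenalice states state → Spec_getIndicesToMargenalice states state (getIndicesToMargenalice states state)

-- ===== LEMMAS AND PROOFS =====

-- the selected (index, value) pairs, shared spec of both first phases
def pvFsel (state : List (Option Int)) : List (Int × Option Int) :=
  (PySem.List.enumerate state 0).filter (fun p => p.2.isSome)

-- A's first loop, generalized over the pair list and accumulator
lemma pv_loopA_general (l : List (Int × Option Int)) (acc : List Int × List Char) :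
    l.foldl (fun (p : List Int × List Char) q =>
        match q.2 with
        | some v => (p.1 ++ [q.1], PySem.Int.toChars v ++ p.2)
        | none => p) acc
    = (acc.1 ++ (l.filter (fun p => p.2.isSome)).map (·.1),
       ((l.filter (fun p => p.2.isSome)).map (fun p => PySem.Int.toChars (p.2.getD 0))).reverse.flatten ++ acc.2) := by
  induction l generalizing acc with
  | nil => simp
  | cons q t ih =>
    obtain ⟨i, v⟩ := q
    cases v <;> simp [ih]

-- enumerate commutes with map on the values
lemma pv_enumerate_map {α β : Type} (f : α → β) (xs : List α) (s : Int) :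
    (PySem.List.enumerate xs s).map (fun p => (p.1, f p.2)) = PySem.List.enumerate (xs.map f) s := by
  induction xs generalizing s with
  | nil => simp [PySem.List.enumerate]
  | cons a t ih => simp [PySem.List.enumerate_cons, ih]

-- PySem.Chars.join with empty separator is flatten
lemma pv_join_nil (ls : List (List Char)) : PySem.Chars.join [] ls = ls.flatten := by
  simp only [PySem.Chars.join, List.intercalate]
  induction ls with
  | nil => simp
  | cons a t ih => cases t <;> simp_all

-- A's inner key loop equals B's join over the index list itself
lemma pv_key_eq (row : List Int) (avail : List Int) :
    (PySem.List.pyRange 0 (PySem.List.len avail) 1).foldl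
        (fun k j => k ++ PySem.Int.toChars
          (PySem.List.pyGetD row (PySem.List.pyGetD avail j 0) 0)) []
    = PySem.Chars.join [] (avail.map (fun j => PySem.Int.toChars (PySem.List.pyGetD row j 0))) := by
  conv_rhs => rw [← PySem.List.map_pyGetD_pyRange_zero avail 0]
  rw [List.map_map, pv_join_nil, ← List.flatMap_def,
    PySem.List.foldl_append_eq_flatMap, List.nil_append]
  rfl

-- A's dict update is an unconditional append at the key
lemma pv_stepA_eq (d : PySem.Dict (List Char) (List Int)) (q : Int × List Char) :
    (match d.get? q.2 with
      | some (x :: xs) => d.insert q.2 ((x :: xs) ++ [q.1])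
      | _ => d.insert q.2 [q.1])
    = d.insert q.2 (d.getD q.2 [] ++ [q.1]) := by
  rcases h : d.get? q.2 with _ | l
  · rw [PySem.Dict.getD_of_get?_eq_none _ _ h]; rfl
  · cases l <;> simp [PySem.Dict.getD_of_get?_eq_some _ _ h]

-- ordered dedup of a snoc
lemma pv_dedup_snoc {α : Type} [BEq α] [LawfulBEq α] (xs : List α) (a : α) :
    PySem.List.dedup (xs ++ [a])
      = if a ∈ PySem.List.dedup xs then PySem.List.dedup xs else PySem.List.dedup xs ++ [a] := by
  simp only [PySem.List.dedup, PySem.Set.ofList, List.foldl_append, List.foldl_cons,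
    List.foldl_nil, PySem.Set.add]
  split_ifs with h1 h2 <;> simp_all

lemma pv_dictA (ps : List (Int × List Char)) :
    (ps.foldl (fun d q => d.insert q.2 (d.getD q.2 [] ++ [q.1])) PySem.Dict.empty).items
    = (PySem.List.dedup (ps.map (·.2))).map
        (fun k => (k, (ps.filter (fun q => q.2 == k)).map (·.1))) := by
  induction ps using List.reverseRecOn with
  | nil => rfl
  | append_singleton xs q ih =>
    obtain ⟨i, k⟩ := q
    rw [List.foldl_append, List.foldl_cons, List.foldl_nil]
    set d := xs.foldl (fun d q => d.insert q.2 (d.getD q.2 [] ++ [q.1])) PySem.Dict.empty with hd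
    have hkeys : d.keys = PySem.List.dedup (xs.map (·.2)) := by
      rw [PySem.Dict.keys, ih, List.map_map]
      exact (List.map_congr_left fun a _ => rfl).trans (List.map_id _)
    have hnd : d.keys.Nodup := by
      rw [hkeys, PySem.List.dedup]; exact PySem.Set.nodup_ofList _
    have hc : d.contains k = decide (k ∈ PySem.List.dedup (xs.map (·.2))) := by
      rw [PySem.Dict.contains_eq_decide_mem_keys, hkeys]
    simp only [List.map_append, List.map_cons, List.map_nil]
    rw [pv_dedup_snoc]
    by_cases h : k ∈ PySem.List.dedup (xs.map (·.2))
    · -- existing key: in-place overwrite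
      have hmem : (k, (xs.filter (fun q => q.2 == k)).map (·.1)) ∈ d.items := by
        rw [ih]; exact List.mem_map.mpr ⟨k, h, rfl⟩
      have hg : d.getD k [] = (xs.filter (fun q => q.2 == k)).map (·.1) :=
        PySem.Dict.getD_of_mem_items d hmem hnd []
      rw [if_pos h, PySem.Dict.items_insert_of_contains _ _ (by rw [hc]; exact decide_eq_true h), ih, List.map_map]
      apply List.map_congr_left
      intro k' hk'
      by_cases hkk : k' = k
      · subst hkk
        simp [hg, List.filter_append]
      · simp [hkk, List.filter_append, Ne.symm hkk]
    · -- new key: appended at the end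
      have hxs : k ∉ xs.map (·.2) := fun hm => h (by
        rw [PySem.List.dedup]; exact (PySem.Set.mem_ofList _ _).mpr hm)
      have hg : d.getD k [] = [] :=
        PySem.Dict.getD_of_not_contains d [] (by rw [hc]; exact decide_eq_false h)
      rw [if_neg h, PySem.Dict.items_insert_of_not_contains _ _ (by rw [hc]; exact decide_eq_false h), ih,
        List.map_append, hg]
      congr 1
      · apply List.map_congr_left
        intro k' hk'
        have hkk : k' ≠ k := fun e => h (e ▸ hk')
        simp [List.filter_append, Ne.symm hkk]
      · have hfe : xs.filter (fun q => q.2 == k) = [] := by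
          rw [List.filter_eq_nil_iff]
          intro q hq
          simpa using fun e => hxs (List.mem_map.mpr ⟨q, hq, e⟩)
        simp [List.filter_append, hfe]

lemma pv_dictB (ks : List (List Char)) (f : List Char → List Int) :
    (ks.foldl (fun (d : PySem.Dict (List Char) (List Int)) k =>
        if d.contains k then d else d.insert k (f k)) PySem.Dict.empty).items
    = (PySem.List.dedup ks).map (fun k => (k, f k)) := by
  induction ks using List.reverseRecOn with
  | nil => rfl
  | append_singleton xs a ih =>
    rw [List.foldl_append, List.foldl_cons, List.foldl_nil, pv_dedup_snoc]
    have hc : (xs.foldl (fun (d : PySem.Dict (List Char) (List Int)) k =>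
        if d.contains k then d else d.insert k (f k)) PySem.Dict.empty).contains a
        = decide (a ∈ PySem.List.dedup xs) := by
      rw [PySem.Dict.contains_eq_decide_mem_keys, PySem.Dict.keys, ih, List.map_map]
      simp
    by_cases h : a ∈ PySem.List.dedup xs
    · have h' : a ∈ xs := (PySem.Set.mem_ofList xs a).mp h
      simp [hc, h', ih, PySem.List.dedup, PySem.Set.mem_ofList]
    · have h'' : a ∉ xs := fun hm => h ((PySem.Set.mem_ofList xs a).mpr hm)
      rw [if_neg h]
      simp only [hc, h, decide_false, Bool.false_eq_true, if_false]
      rw [PySem.Dict.items_insert_of_not_contains _ _ (by simp [hc, h'']), ih, List.map_append]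
      rfl

-- ===== VERDICT (by name: the statement is the Claim_ definition above) =====
-- the Horner fold over the selected bits equals A's guarded base-2 parse of csValue
lemma pv_value_eq (state : List (Option Int))
    (hbits : ∀ v ∈ state, v = none ∨ v = some 0 ∨ v = some 1) :
    ((pvFsel state).map (·.1)).reverse.foldl
        (fun a j => 2 * a + (PySem.List.pyGetD state j none).getD 0) 0
    = (if ((pvFsel state).map (fun p => PySem.Int.toChars (p.2.getD 0))).reverse.flatten = [] then 0
       else pvBin2 (((pvFsel state).map (fun p => PySem.Int.toChars (p.2.getD 0))).reverse.flatten)) := by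
  set fs := pvFsel state with hfs
  have hmem : ∀ p ∈ fs, (p.2 = some 0 ∨ p.2 = some 1) ∧ PySem.List.pyGetD state p.1 none = p.2 := by
    intro p hp
    have hp' : p ∈ PySem.List.enumerate state 0 := List.mem_of_mem_filter hp
    have hs : p.2.isSome := by simpa using List.of_mem_filter hp
    obtain ⟨k, hk, rfl⟩ := (PySem.List.mem_enumerate_iff state 0 p).mp hp'
    refine ⟨?_, ?_⟩
    · rcases hbits state[k] (List.getElem_mem hk) with h | h | h
      · simp [h] at hs
      · left; simpa using h
      · right; simpa using h
    · show PySem.List.pyGetD state ((0 : Int) + (k : Int)) none = state[k]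
      rw [zero_add, PySem.List.pyGetD_natCast, List.getD_eq_getElem state none hk]
  have hchars : fs.map (fun p => PySem.Int.toChars (p.2.getD 0))
      = fs.map (fun p => [if p.2.getD 0 = 1 then '1' else '0']) := by
    apply List.map_congr_left; intro p hp
    rcases (hmem p hp).1 with h | h <;> rw [h] <;> rfl
  rw [hchars, ← List.map_reverse, ← List.map_reverse, List.foldl_map]
  have hflat : (fs.reverse.map (fun p => [if p.2.getD 0 = 1 then '1' else '0'])).flatten
      = fs.reverse.map (fun p => if p.2.getD 0 = 1 then '1' else '0') := by
    generalize fs.reverse = l; induction l with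
    | nil => simp
    | cons a t ih => simp [ih]
  rw [hflat]
  have hmemr : ∀ p ∈ fs.reverse, (p.2 = some 0 ∨ p.2 = some 1) ∧ PySem.List.pyGetD state p.1 none = p.2 :=
    fun p hp => hmem p (List.mem_reverse.mp hp)
  rcases hr : fs.reverse with _ | ⟨q, t⟩
  · simp
  · rw [if_neg (by simp)]
    unfold pvBin2
    rw [List.foldl_map]
    rw [← hr]
    apply PySem.List.foldl_congr_mem
    intro acc p hp
    rcases (hmemr p (hr ▸ hp)).1 with h | h <;>
      rw [(hmemr p (hr ▸ hp)).2, h] <;> simp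

theorem getIndicesToMargenalice_spec : Claim_equal_getIndicesToMargenalice := by
  intro states state hDom hPre
  obtain ⟨hbits, hlen⟩ := hPre
  unfold Spec_getIndicesToMargenalice getIndicesToMargenalice getIndicesToMargenalice_alt
  -- names for the shared pieces
  set fs := pvFsel state with hfs
  set sel : List Int := fs.map (·.1) with hsel
  set cs : List Char := (fs.map (fun p => PySem.Int.toChars (p.2.getD 0))).reverse.flatten with hcs
  -- A's first loop computes (sel, cs)
  have h1 : (PySem.List.pyRange 0 (PySem.List.len state) 1).foldl
      (fun (p : List Int × List Char) i =>
        match PySem.List.pyGetD state i none with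
        | some v => (p.1 ++ [i], PySem.Int.toChars v ++ p.2)
        | none => p) ([], []) = (sel, cs) := by
    have hfold : (PySem.List.pyRange 0 (PySem.List.len state) 1).foldl
        (fun (p : List Int × List Char) i =>
          match PySem.List.pyGetD state i none with
          | some v => (p.1 ++ [i], PySem.Int.toChars v ++ p.2)
          | none => p) ([], [])
        = (PySem.List.enumerate state 0).foldl
        (fun (p : List Int × List Char) q =>
          match q.2 with
          | some v => (p.1 ++ [q.1], PySem.Int.toChars v ++ p.2)
          | none => p) ([], []) := by
      rw [PySem.List.enumerate_eq_map_pyRange state none, List.foldl_map]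
    rw [hfold, pv_loopA_general]
    simp [hfs, hsel, hcs, pvFsel]
  rw [h1]
  dsimp only
  have hselB : List.map (fun (x : Int × Option Int) => x.1)
      (List.filter (fun p => p.2.isSome) (PySem.List.enumerate state)) = sel := by
    rw [hsel, hfs, pvFsel]
  rw [hselB]
  simp only [pv_key_eq]
  set keys : List (List Char) := states.map (fun row =>
      PySem.Chars.join [] (sel.map (fun j => PySem.Int.toChars (PySem.List.pyGetD row j 0)))) with hkeys
  -- A's grouping loop is the pair fold over the enumerated key list
  have hAfold : List.foldl (fun (d : PySem.Dict (List Char) (List Int)) (i : Int) =>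
      match d.get? (PySem.Chars.join [] (sel.map (fun j => PySem.Int.toChars
          (PySem.List.pyGetD (PySem.List.pyGetD states i []) j 0)))) with
      | some (x :: xs) => d.insert (PySem.Chars.join [] (sel.map (fun j => PySem.Int.toChars
          (PySem.List.pyGetD (PySem.List.pyGetD states i []) j 0)))) ((x :: xs) ++ [i])
      | _ => d.insert (PySem.Chars.join [] (sel.map (fun j => PySem.Int.toChars
          (PySem.List.pyGetD (PySem.List.pyGetD states i []) j 0)))) [i])
      PySem.Dict.empty (PySem.List.pyRange 0 (PySem.List.len states))
      = List.foldl (fun (d : PySem.Dict (List Char) (List Int)) (q : Int × List Char) =>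
        match d.get? q.2 with
        | some (x :: xs) => d.insert q.2 ((x :: xs) ++ [q.1])
        | _ => d.insert q.2 [q.1]) PySem.Dict.empty (PySem.List.enumerate keys 0) := by
    rw [hkeys, ← pv_enumerate_map, List.foldl_map,
      PySem.List.enumerate_eq_map_pyRange states [], List.foldl_map]
  rw [hAfold]
  have hstep : (fun (d : PySem.Dict (List Char) (List Int)) (q : Int × List Char) =>
      match d.get? q.2 with
      | some (x :: xs) => d.insert q.2 ((x :: xs) ++ [q.1])
      | _ => d.insert q.2 [q.1])
      = fun (d : PySem.Dict (List Char) (List Int)) (q : Int × List Char) =>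
          d.insert q.2 (d.getD q.2 [] ++ [q.1]) := by
    funext d q; exact pv_stepA_eq d q
  rw [hstep, pv_dictA, pv_dictB, PySem.List.map_snd_enumerate]
  simp only [pvFullIdx]
  rw [hsel, hcs, hfs, pv_value_eq state hbits]
  split_ifs <;> rfl
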